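-- pv_equiv track=rewrite | github.com/omeralierdemir/BreadthSearchForMaze | ol.py | dugumFiltre
-- ===== SOURCE A (Python) =====
-- def dugumFiltre(i1,j1,dugum,img=None):
--
--
--     dizi = []
--
--     kopru = 0
--
--
--
--     for i in dugum:
--         dizi = []
--         for j in dugum:
--
--             res = abs(i[0] - j[0])
--
--             res2 = abs(i[1] - j[1])
--
--             if(res > 1 or res2 > 1 or (res == 1 and res2 == 1)):
--
--                 dizi = dugum[:]
--
--                 kopru = 1
--
--                 break
--
--         if(kopru == 1):
--
--             break
--
--     if(kopru == 0):
--
--         for n in dugum: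
--
--             if ([i1, j1 + 1] == n):  # ----> 0
--
--                 dizi.append(n)
--
--
--             elif([i1 + 1,j1] == n):  # ----> 2
--
--                 dizi.append(n)
--
--
--             elif ([i1, j1 - 1] == n): # ----> 4
--
--                 dizi.append(n)
--
--             elif ([i1 -1, j1] == n):  # ----> 6
--
--                 dizi.append(n)
--
--
--     return dizi
-- ===== SOURCE B (Python) =====
-- def dugumFiltre(i1, j1, dugum, img=None):
--     if dugum:
--         xs = [p[0] for p in dugum]
--         ys = [p[1] for p in dugum]
--         rx = max(xs) - min(xs)
--         ry = max(ys) - min(ys)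
--         if rx > 1 or ry > 1 or (rx >= 1 and ry >= 1):
--             return dugum[:]
--     nbrs = ([i1, j1 + 1], [i1 + 1, j1], [i1, j1 - 1], [i1 - 1, j1])
--     return [n for n in dugum if n in nbrs]
-- ===== Notes on version B (the rewrite author's own statement) =====
-- stated objective: alternative
-- what changed: Replaces A's all-pairs scan for a non-adjacent node pair with a single pass computing the x and y coordinate ranges (a bad pair exists iff some range exceeds 1 or both ranges are at least 1), and replaces the elif-chain append loop with one list-comprehension filter over the 4 neighbors.
-- outside the precondition, e.g. on dugumFiltre(0, 0, [[0, 0], [5, 5], [1]], None): A returns [[0, 0], [5, 5], [1]], B raises IndexError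
import Mathlib
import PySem

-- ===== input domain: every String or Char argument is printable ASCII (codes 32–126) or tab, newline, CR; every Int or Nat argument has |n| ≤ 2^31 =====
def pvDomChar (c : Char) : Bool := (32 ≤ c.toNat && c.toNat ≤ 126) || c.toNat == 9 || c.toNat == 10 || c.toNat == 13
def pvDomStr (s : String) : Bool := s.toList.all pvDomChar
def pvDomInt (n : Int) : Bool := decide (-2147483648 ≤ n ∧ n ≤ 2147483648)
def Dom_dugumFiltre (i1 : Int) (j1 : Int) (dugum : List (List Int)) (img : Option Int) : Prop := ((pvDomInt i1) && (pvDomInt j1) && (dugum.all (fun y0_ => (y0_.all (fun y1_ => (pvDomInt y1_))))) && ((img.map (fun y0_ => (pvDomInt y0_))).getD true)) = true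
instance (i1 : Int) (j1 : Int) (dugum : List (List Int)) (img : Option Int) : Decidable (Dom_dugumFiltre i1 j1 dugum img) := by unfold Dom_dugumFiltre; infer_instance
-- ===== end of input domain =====

-- B replaces A's O(n^2) all-pairs scan by a one-pass coordinate-range test and a filter; proved equal on rows of length ≥ 2.

-- ===== PORT A =====
-- i[0] / i[1]: in Python an IndexError on short rows; pyGetD is exact under Pre_ (rows of length ≥ 2)
def pvX (p : List Int) : Int := PySem.List.pyGetD p 0 0
def pvY (p : List Int) : Int := PySem.List.pyGetD p 1 0

-- res/res2 and the break condition of A's inner loop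
def pvCond (i j : List Int) : Bool :=
  let res := |pvX i - pvX j|
  let res2 := |pvY i - pvY j|
  decide (res > 1) || decide (res2 > 1) || (decide (res = 1) && decide (res2 = 1))

-- inner 'for j in dugum: … break' — returns whether kopru was set
def pvInner (i : List Int) : List (List Int) → Bool
  | [] => false
  | j :: rest => if pvCond i j then true else pvInner i rest

-- outer 'for i in dugum: … break'
def pvOuter (dugum : List (List Int)) : List (List Int) → Bool
  | [] => false
  | i :: rest => if pvInner i dugum then true else pvOuter dugum rest

-- the kopru == 0 append loop (elif chain), accumulator = dizi
def pvFilt (i1 j1 : Int) (acc : List (List Int)) : List (List Int) → List (List Int)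
  | [] => acc
  | n :: rest =>
    if n = [i1, j1 + 1] then pvFilt i1 j1 (acc ++ [n]) rest
    else if n = [i1 + 1, j1] then pvFilt i1 j1 (acc ++ [n]) rest
    else if n = [i1, j1 - 1] then pvFilt i1 j1 (acc ++ [n]) rest
    else if n = [i1 - 1, j1] then pvFilt i1 j1 (acc ++ [n]) rest
    else pvFilt i1 j1 acc rest

def dugumFiltre (i1 : Int) (j1 : Int) (dugum : List (List Int)) (img : Option Int) : List (List Int) :=
  if pvOuter dugum dugum then dugum else pvFilt i1 j1 [] dugum

-- ===== PORT B =====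
-- rx > 1 or ry > 1 or (rx >= 1 and ry >= 1), with rx/ry the coordinate ranges (Source B's bad test)
def pvBadB (dugum : List (List Int)) : Bool :=
  let xs := dugum.map (fun p => PySem.List.pyGetD p 0 0)
  let ys := dugum.map (fun p => PySem.List.pyGetD p 1 0)
  let rx := (PySem.List.max? xs (fun x => x)).getD 0 - (PySem.List.min? xs (fun x => x)).getD 0
  let ry := (PySem.List.max? ys (fun x => x)).getD 0 - (PySem.List.min? ys (fun x => x)).getD 0
  decide (rx > 1) || decide (ry > 1) || (decide (rx ≥ 1) && decide (ry ≥ 1))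

-- n in nbrs (the 4-tuple of neighbor cells)
def pvNbrB (i1 j1 : Int) (n : List Int) : Bool :=
  n == [i1, j1 + 1] || n == [i1 + 1, j1] || n == [i1, j1 - 1] || n == [i1 - 1, j1]

def dugumFiltre_alt (i1 : Int) (j1 : Int) (dugum : List (List Int)) (img : Option Int) : List (List Int) :=
  if !dugum.isEmpty && pvBadB dugum then dugum
  else dugum.filter (pvNbrB i1 j1)

-- ===== PRECONDITION & SPEC =====
-- Pre_ excludes lists containing a row of fewer than 2 ints: there Python raises IndexError (B always, A unless its pair scan breaks before reaching the short row).
def Pre_dugumFiltre (i1 : Int) (j1 : Int) (dugum : List (List Int)) (img : Option Int) : Prop :=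
  ∀ r ∈ dugum, 2 ≤ r.length
instance (i1 : Int) (j1 : Int) (dugum : List (List Int)) (img : Option Int) : Decidable (Pre_dugumFiltre i1 j1 dugum img) := by unfold Pre_dugumFiltre; infer_instance

def pvWitness_dugumFiltre : Int × Int × List (List Int) × Option Int := (0, 0, [[0, 1], [1, 0]], none)

def Spec_dugumFiltre (i1 : Int) (j1 : Int) (dugum : List (List Int)) (img : Option Int) (out : List (List Int)) : Prop := out = dugumFiltre_alt i1 j1 dugum img
instance (i1 : Int) (j1 : Int) (dugum : List (List Int)) (img : Option Int) (out : List (List Int)) : Decidable (Spec_dugumFiltre i1 j1 dugum img out) := by unfold Spec_dugumFiltre; infer_instance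

-- ===== CLAIM (what is proved, stated in full; the proofs are below) =====
def Claim_equal_dugumFiltre : Prop := ∀ (i1 : Int) (j1 : Int) (dugum : List (List Int)) (img : Option Int), Dom_dugumFiltre i1 j1 dugum img → Pre_dugumFiltre i1 j1 dugum img → Spec_dugumFiltre i1 j1 dugum img (dugumFiltre i1 j1 dugum img)

-- ===== LEMMAS AND PROOFS =====

theorem pvFilt_eq (i1 j1 : Int) (l : List (List Int)) (acc : List (List Int)) :
    pvFilt i1 j1 acc l = acc ++ l.filter (pvNbrB i1 j1) := by
  induction l generalizing acc with
  | nil => simp [pvFilt]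
  | cons n rest ih =>
    simp only [pvFilt, pvNbrB, List.filter_cons]
    split_ifs with h1 h2 h3 h4 <;> simp_all

theorem pvInner_eq (i : List Int) (l : List (List Int)) :
    pvInner i l = l.any (fun j => pvCond i j) := by
  induction l with
  | nil => rfl
  | cons j rest ih =>
    simp only [pvInner, List.any_cons]
    split_ifs with h <;> simp [h, ih]

theorem pvOuter_eq (d l : List (List Int)) :
    pvOuter d l = l.any (fun i => pvInner i d) := by
  induction l with
  | nil => rfl
  | cons i rest ih =>
    simp only [pvOuter, List.any_cons]
    split_ifs with h <;> simp [h, ih]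

theorem pvCond_iff (i j : List Int) :
    pvCond i j = true ↔
      (1 < |pvX i - pvX j| ∨ 1 < |pvY i - pvY j| ∨ (|pvX i - pvX j| = 1 ∧ |pvY i - pvY j| = 1)) := by
  simp [pvCond]
  omega

theorem pvCond_of_ne (i j : List Int) (hx : pvX i ≠ pvX j) (hy : pvY i ≠ pvY j) :
    pvCond i j = true := by
  rw [pvCond_iff]
  rcases abs_cases (pvX i - pvX j) with ⟨h1, _⟩ | ⟨h1, _⟩ <;>
    rcases abs_cases (pvY i - pvY j) with ⟨h2, _⟩ | ⟨h2, _⟩ <;> omega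

theorem pvCond_of_gt_x (i j : List Int) (hx : 1 < pvX i - pvX j) : pvCond i j = true := by
  rw [pvCond_iff]
  rcases abs_cases (pvX i - pvX j) with ⟨h1, _⟩ | ⟨h1, _⟩ <;> omega

theorem pvCond_of_gt_y (i j : List Int) (hy : 1 < pvY i - pvY j) : pvCond i j = true := by
  rw [pvCond_iff]
  rcases abs_cases (pvY i - pvY j) with ⟨h1, _⟩ | ⟨h1, _⟩ <;> omega

-- the crux: the all-pairs scan agrees with the coordinate-range test on nonempty lists
theorem pvBad_iff (d : List (List Int)) (hd : d ≠ []) :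
    (d.any fun i => d.any (pvCond i)) = true ↔ pvBadB d = true := by
  have hxs : d.map (fun p => PySem.List.pyGetD p 0 0) = d.map pvX := rfl
  have hys : d.map (fun p => PySem.List.pyGetD p 1 0) = d.map pvY := rfl
  obtain ⟨mx, hmx⟩ : ∃ m, PySem.List.max? (d.map pvX) (fun x => x) = some m := by
    rcases h : PySem.List.max? (d.map pvX) (fun x => x) with _ | m
    · rw [PySem.List.max?_eq_none_iff] at h; simp [hd] at h
    · exact ⟨m, rfl⟩
  obtain ⟨nx, hnx⟩ : ∃ m, PySem.List.min? (d.map pvX) (fun x => x) = some m := by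
    rcases h : PySem.List.min? (d.map pvX) (fun x => x) with _ | m
    · rw [PySem.List.min?_eq_none_iff] at h; simp [hd] at h
    · exact ⟨m, rfl⟩
  obtain ⟨my, hmy⟩ : ∃ m, PySem.List.max? (d.map pvY) (fun x => x) = some m := by
    rcases h : PySem.List.max? (d.map pvY) (fun x => x) with _ | m
    · rw [PySem.List.max?_eq_none_iff] at h; simp [hd] at h
    · exact ⟨m, rfl⟩
  obtain ⟨ny, hny⟩ : ∃ m, PySem.List.min? (d.map pvY) (fun x => x) = some m := by
    rcases h : PySem.List.min? (d.map pvY) (fun x => x) with _ | m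
    · rw [PySem.List.min?_eq_none_iff] at h; simp [hd] at h
    · exact ⟨m, rfl⟩
  have hmxU : ∀ p ∈ d, pvX p ≤ mx := fun p hp =>
    PySem.List.max?_isMax hmx (pvX p) (List.mem_map_of_mem hp)
  have hnxL : ∀ p ∈ d, nx ≤ pvX p := fun p hp =>
    PySem.List.min?_isMin hnx (pvX p) (List.mem_map_of_mem hp)
  have hmyU : ∀ p ∈ d, pvY p ≤ my := fun p hp =>
    PySem.List.max?_isMax hmy (pvY p) (List.mem_map_of_mem hp)
  have hnyL : ∀ p ∈ d, ny ≤ pvY p := fun p hp =>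
    PySem.List.min?_isMin hny (pvY p) (List.mem_map_of_mem hp)
  obtain ⟨p, hpmem, hpx⟩ : ∃ p ∈ d, pvX p = mx := by
    have := PySem.List.max?_mem hmx; rcases List.mem_map.1 this with ⟨p, hp, he⟩; exact ⟨p, hp, he⟩
  obtain ⟨q, hqmem, hqx⟩ : ∃ q ∈ d, pvX q = nx := by
    have := PySem.List.min?_mem hnx; rcases List.mem_map.1 this with ⟨q, hq, he⟩; exact ⟨q, hq, he⟩
  obtain ⟨r, hrmem, hry⟩ : ∃ r ∈ d, pvY r = my := by
    have := PySem.List.max?_mem hmy; rcases List.mem_map.1 this with ⟨r, hr, he⟩; exact ⟨r, hr, he⟩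
  obtain ⟨s, hsmem, hsy⟩ : ∃ s ∈ d, pvY s = ny := by
    have := PySem.List.min?_mem hny; rcases List.mem_map.1 this with ⟨s, hs, he⟩; exact ⟨s, hs, he⟩
  have hBadB : pvBadB d = true ↔
      (1 < mx - nx ∨ 1 < my - ny ∨ (1 ≤ mx - nx ∧ 1 ≤ my - ny)) := by
    simp [pvBadB, hxs, hys, hmx, hnx, hmy, hny]
    omega
  rw [hBadB]
  constructor
  · intro h
    rcases List.any_eq_true.1 h with ⟨i, hi, h2⟩
    rcases List.any_eq_true.1 h2 with ⟨j, hj, hc⟩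
    rw [pvCond_iff] at hc
    have h1 := hmxU i hi; have h2 := hmxU j hj
    have h3 := hnxL i hi; have h4 := hnxL j hj
    have h5 := hmyU i hi; have h6 := hmyU j hj
    have h7 := hnyL i hi; have h8 := hnyL j hj
    rcases abs_cases (pvX i - pvX j) with ⟨h9, _⟩ | ⟨h9, _⟩ <;>
      rcases abs_cases (pvY i - pvY j) with ⟨h10, _⟩ | ⟨h10, _⟩ <;> omega
  · intro h
    have pair : ∀ a ∈ d, ∀ b ∈ d, pvCond a b = true →
        (d.any fun i => d.any (pvCond i)) = true := by
      intro a ha b hb hc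
      exact List.any_eq_true.2 ⟨a, ha, List.any_eq_true.2 ⟨b, hb, hc⟩⟩
    rcases h with h | h | ⟨hx1, hy1⟩
    · exact pair p hpmem q hqmem (pvCond_of_gt_x _ _ (by omega))
    · exact pair r hrmem s hsmem (pvCond_of_gt_y _ _ (by omega))
    · -- both ranges ≥ 1; find a pair differing in both coordinates
      by_cases hpq : pvY p = pvY q
      · -- p and q share y; one of r, s has a different y
        have hrs : pvY r ≠ pvY s := by omega
        rcases ne_or_eq (pvY r) (pvY p) with ht | ht
        · -- t := r
          by_cases htx : pvX r = pvX p
          · refine pair r hrmem q hqmem (pvCond_of_ne _ _ ?_ ?_) <;> omega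
          · refine pair r hrmem p hpmem (pvCond_of_ne _ _ ?_ ?_) <;> omega
        · -- pvY r = pvY p, so pvY s ≠ pvY p; t := s
          have hts : pvY s ≠ pvY p := by omega
          by_cases htx : pvX s = pvX p
          · refine pair s hsmem q hqmem (pvCond_of_ne _ _ ?_ ?_) <;> omega
          · refine pair s hsmem p hpmem (pvCond_of_ne _ _ ?_ ?_) <;> omega
      · refine pair p hpmem q hqmem (pvCond_of_ne _ _ ?_ ?_) <;> omega

theorem pvOuter_eq_badB (d : List (List Int)) :
    pvOuter d d = (!d.isEmpty && pvBadB d) := by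
  rcases eq_or_ne d [] with rfl | hd
  · rfl
  · have h1 : pvOuter d d = (d.any fun i => d.any (pvCond i)) := by
      have hf : (fun i => pvInner i d) = fun i => d.any (pvCond i) :=
        funext fun i => pvInner_eq i d
      rw [pvOuter_eq, hf]
    have h2 : (!d.isEmpty) = true := by simp [hd]
    rw [h1, h2, Bool.true_and, Bool.eq_iff_iff, pvBad_iff d hd]

-- ===== VERDICT (by name: the statement is the Claim_ definition above) =====
theorem dugumFiltre_spec : Claim_equal_dugumFiltre := by
  intro i1 j1 dugum img _ _
  unfold Spec_dugumFiltre dugumFiltre dugumFiltre_alt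
  rw [pvOuter_eq_badB, pvFilt_eq]
  simp
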